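-- pv_equiv track=rewrite | github.com/smartprasad2001-cyber/MIID | name_variations_strong.py | add_double_letters
-- ===== SOURCE A (Python) =====
-- VOWELS = "aeiouy"
--
-- def add_double_letters(word):
--     """Insert or remove double letters at consonant positions."""
--     results = set([word])
--     for i, ch in enumerate(word[:-1]):
--         if ch == word[i+1]:
--             # remove a double
--             results.add(word[:i] + ch + word[i+2:])
--         else:
--             # insert a double for consonants
--             if ch.isalpha() and ch not in VOWELS:
--                 results.add(word[:i+1] + ch + word[i+1:])
--     return results
-- ===== SOURCE B (Python) =====
-- VOWELS = "aeiouy"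
--
--
-- def _variants(pre, rest):
--     """Walk the word as a prefix/suffix zipper, collecting variant strings in order."""
--     out = []
--     while len(rest) >= 2:
--         ch = rest[0]
--         if ch == rest[1]:
--             out.append(pre + rest[1:])        # drop one of the double
--         elif ch.isalpha() and ch not in VOWELS:
--             out.append(pre + ch + rest)       # double the consonant
--         pre += ch
--         rest = rest[1:]
--     return out
--
--
-- def add_double_letters(word):
--     """Insert or remove double letters at consonant positions."""
--     return set([word] + _variants("", word))
-- ===== Notes on version B (the rewrite author's own statement) =====
-- stated objective: alternative
-- what changed: Replaces A's indexed scan that slices the whole word and mutates a set per branch with a prefix/suffix zipper walk that builds the candidate-variant list functionally and deduplicates once with a single set() at the end.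
import Mathlib
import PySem

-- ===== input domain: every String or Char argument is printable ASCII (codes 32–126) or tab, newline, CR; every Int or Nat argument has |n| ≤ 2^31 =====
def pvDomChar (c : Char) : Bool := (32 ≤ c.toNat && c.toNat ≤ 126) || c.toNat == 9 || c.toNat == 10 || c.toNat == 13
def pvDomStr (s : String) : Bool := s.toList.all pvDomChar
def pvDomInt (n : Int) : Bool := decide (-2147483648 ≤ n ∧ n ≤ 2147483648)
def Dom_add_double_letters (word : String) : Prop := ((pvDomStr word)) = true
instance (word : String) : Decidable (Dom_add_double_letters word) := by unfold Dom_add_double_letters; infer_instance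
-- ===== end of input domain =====

-- B replaces A's indexed scan (slicing the word and mutating a set) with a prefix/suffix
-- zipper that collects a candidate list deduplicated once at the end (objective: alternative).


-- ===== PORT A =====
-- one loop step of A: branch on word[i] == word[i+1], else consonant doubling
-- (word[i+1] is always in range here, so the total pyGetD with a dummy default is exact)
def pvStepA (cs : List Char) (res : List String) (p : Int × Char) : List String :=
  let i := p.1
  let ch := p.2
  if ch == PySem.List.pyGetD cs (i + 1) ' ' then
    PySem.Set.add res (String.ofList (PySem.List.slice cs none (some i) ++ [ch] ++
      PySem.List.slice cs (some (i + 2)) none))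
  else if PySem.Chars.strIsalpha [ch] && !(PySem.Chars.isIn [ch] "aeiouy".toList) then
    PySem.Set.add res (String.ofList (PySem.List.slice cs none (some (i + 1)) ++ [ch] ++
      PySem.List.slice cs (some (i + 1)) none))
  else res

def add_double_letters (word : String) : List String :=
  (PySem.List.enumerate (PySem.Chars.slice word.toList none (some (-1))) 0).foldl
    (pvStepA word.toList) (PySem.Set.ofList [word])

-- ===== PORT B =====
-- the while loop of Source B's _variants: pre/rest zipper, candidates appended in order
def pvVariants : List Char → List Char → List String
  | pre, ch :: nxt :: rest =>
    if ch == nxt then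
      String.ofList (pre ++ nxt :: rest) :: pvVariants (pre ++ [ch]) (nxt :: rest)
    else if PySem.Chars.strIsalpha [ch] && !(PySem.Chars.isIn [ch] "aeiouy".toList) then
      String.ofList (pre ++ ch :: ch :: nxt :: rest) :: pvVariants (pre ++ [ch]) (nxt :: rest)
    else
      pvVariants (pre ++ [ch]) (nxt :: rest)
  | _, _ => []

def add_double_letters_alt (word : String) : List String :=
  PySem.Set.ofList (word :: pvVariants [] word.toList)

-- ===== PRECONDITION & SPEC =====
def Spec_add_double_letters (word : String) (out : List String) : Prop := out = add_double_letters_alt word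
instance (word : String) (out : List String) : Decidable (Spec_add_double_letters word out) := by unfold Spec_add_double_letters; infer_instance

-- ===== CLAIM (what is proved, stated in full; the proofs are below) =====
def Claim_equal_add_double_letters : Prop := ∀ (word : String), Dom_add_double_letters word → Spec_add_double_letters word (add_double_letters word)

-- ===== LEMMAS AND PROOFS =====

-- the zipper invariant: A's fold over the enumerated tail of the word equals
-- folding Set.add over B's candidate list, when pre ++ rest is the whole word
lemma pvMain : ∀ (rest pre : List Char) (s : List String),
    List.foldl (pvStepA (pre ++ rest)) s
      (PySem.List.enumerate rest.dropLast (pre.length : Int))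
    = List.foldl PySem.Set.add s (pvVariants pre rest) := by
  intro rest
  induction rest with
  | nil => intro pre s; simp [pvVariants]
  | cons ch tail ih =>
    intro pre s
    match tail with
    | [] => simp [pvVariants]
    | nxt :: r =>
      have hgd : PySem.List.pyGetD (pre ++ ch :: nxt :: r) ((pre.length : Int) + 1) ' ' = nxt := by
        have : ((pre.length : Int) + 1) = ((pre.length + 1 : Nat) : Int) := by push_cast; ring
        rw [this, PySem.List.pyGetD_natCast]
        simp [List.getD]
      have htake : PySem.List.slice (pre ++ ch :: nxt :: r) none (some (pre.length : Int))
          = pre := by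
        rw [PySem.List.slice_to _ (by positivity)]
        simp
      have htake1 : PySem.List.slice (pre ++ ch :: nxt :: r) none (some ((pre.length : Int) + 1))
          = pre ++ [ch] := by
        rw [PySem.List.slice_to _ (by positivity)]
        have : ((pre.length : Int) + 1).toNat = pre.length + 1 := by omega
        rw [this, List.take_append]
        simp
      have hdrop1 : PySem.List.slice (pre ++ ch :: nxt :: r) (some ((pre.length : Int) + 1)) none
          = nxt :: r := by
        rw [PySem.List.slice_from _ (by positivity)]
        have : ((pre.length : Int) + 1).toNat = pre.length + 1 := by omega
        rw [this, List.drop_append]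
        simp
      have hdrop2 : PySem.List.slice (pre ++ ch :: nxt :: r) (some ((pre.length : Int) + 2)) none
          = r := by
        rw [PySem.List.slice_from _ (by positivity)]
        have : ((pre.length : Int) + 2).toNat = pre.length + 2 := by omega
        rw [this, List.drop_append]
        simp
      have ihx := ih (pre ++ [ch])
      simp only [List.append_assoc, List.singleton_append, List.length_append,
        List.length_singleton, Nat.cast_add, Nat.cast_one] at ihx
      show List.foldl (pvStepA (pre ++ ch :: nxt :: r)) s
          (PySem.List.enumerate (ch :: (nxt :: r).dropLast) (pre.length : Int)) = _
      rw [PySem.List.enumerate_cons]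
      by_cases hceq : ch == nxt
      · have hch : ch = nxt := by exact eq_of_beq hceq
        simp only [List.foldl_cons, pvStepA, hgd, htake, hdrop2, hceq, if_pos, pvVariants]
        rw [ihx]
        subst hch
        simp
      · by_cases hcons : (PySem.Chars.strIsalpha [ch] && !(PySem.Chars.isIn [ch] "aeiouy".toList)) = true
        · simp only [List.foldl_cons, pvStepA, hgd, htake1, hdrop1, hceq, hcons,
            Bool.false_eq_true, if_false, if_pos, pvVariants]
          rw [ihx]
          simp
        · simp only [List.foldl_cons, pvStepA, hgd, hceq, hcons, Bool.false_eq_true,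
            if_false, pvVariants]
          rw [ihx]

-- ===== VERDICT (by name: the statement is the Claim_ definition above) =====
theorem add_double_letters_spec : Claim_equal_add_double_letters := by
  intro word _
  unfold Spec_add_double_letters add_double_letters add_double_letters_alt
  have hsl : PySem.Chars.slice word.toList none (some (-1)) = word.toList.dropLast := by
    simp [pysem]
  rw [hsl]
  have := pvMain word.toList [] (PySem.Set.ofList [word])
  simp only [List.nil_append, List.length_nil, Nat.cast_zero] at this
  rw [this, PySem.Set.ofList_eq_foldl (word :: pvVariants [] word.toList), List.foldl_cons]
  rfl
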